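-- pv_equiv track=rewrite | github.com/KazukiNoSuzaku/Leetcode | Python/2105_Watering_Plants_II.py | minimumRefill
-- ===== SOURCE A (Python) =====
-- def minimumRefill(plants, capacityA, capacityB):
--     """
--     :type plants: List[int]
--     :type capacityA: int
--     :type capacityB: int
--     :rtype: int
--     """
--     n = len(plants)
--     left, right = 0, n - 1
--     a, b = capacityA, capacityB
--     refills = 0
--
--     while left < right:
--         if a < plants[left]:
--             refills += 1
--             a = capacityA
--         a -= plants[left]
--         left += 1
--
--         if b < plants[right]:
--             refills += 1
--             b = capacityB
--         b -= plants[right]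
--         right -= 1
--
--     if left == right:
--         if max(a, b) < plants[left]:
--             refills += 1
--
--     return refills
-- ===== SOURCE B (Python) =====
-- def minimumRefill(plants, capacityA, capacityB):
--     n = len(plants)
--     half = n // 2
--
--     def drain(cap, seg):
--         # per-tank epochs: outer loop = one tankful, inner loop drains it
--         # across a maximal run of plants; a refill waters the blocking plant.
--         water = cap
--         cnt = 0
--         i = 0
--         m = len(seg)
--         while i < m:
--             while i < m and water >= seg[i]:
--                 water -= seg[i]
--                 i += 1
--             if i < m:
--                 cnt += 1
--                 water = cap - seg[i]
--                 i += 1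
--         return water, cnt
--
--     la, ra = drain(capacityA, plants[:half])
--     lb, rb = drain(capacityB, plants[half + n % 2:][::-1])
--     refills = ra + rb
--     if n % 2 == 1 and max(la, lb) < plants[half]:
--         refills += 1
--     return refills
-- ===== Notes on version B (the rewrite author's own statement) =====
-- stated objective: alternative
-- what changed: Replaces A's interleaved two-pointer simulation with two independent per-gardener passes organised as per-tankful epochs: an outer loop per refill whose inner loop drains one tankful across a maximal run of plants, plus an explicit odd-length middle-plant resolution.
import Mathlib
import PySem

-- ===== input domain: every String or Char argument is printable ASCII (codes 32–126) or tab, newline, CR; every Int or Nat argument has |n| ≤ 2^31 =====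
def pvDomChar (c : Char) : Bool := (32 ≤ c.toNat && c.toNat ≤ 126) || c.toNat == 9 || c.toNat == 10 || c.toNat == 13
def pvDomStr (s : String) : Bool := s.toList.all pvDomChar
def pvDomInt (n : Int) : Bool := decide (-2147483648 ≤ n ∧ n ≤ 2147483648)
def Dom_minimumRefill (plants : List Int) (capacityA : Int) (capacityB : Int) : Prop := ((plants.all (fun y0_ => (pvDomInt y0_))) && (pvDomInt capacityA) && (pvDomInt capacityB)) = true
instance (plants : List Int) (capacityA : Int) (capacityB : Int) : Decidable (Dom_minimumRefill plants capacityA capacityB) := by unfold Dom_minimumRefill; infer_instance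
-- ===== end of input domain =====

-- B replaces A's interleaved two-pointer simulation with two independent per-gardener passes
-- organised as per-tankful epochs (outer loop per refill, inner loop drains one tankful),
-- plus a middle-plant resolution for odd length (objective: alternative).

-- ===== PORT A =====
-- A's while-loop, state (left, right, a, b, refills); returns the state at loop exit.
-- fuel = an upper bound on the number of iterations (the list length suffices); it only
-- makes the recursion structural, the loop still exits by the `left < right` test as in A.
def minimumRefillLoop (plants : List Int) (capacityA : Int) (capacityB : Int) :
    Nat → Int → Int → Int → Int → Int → Int × Int × Int × Int × Int
  | 0, left, right, a, b, refills => (left, right, a, b, refills)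
  | fuel + 1, left, right, a, b, refills =>
    if left < right then
      let pl := PySem.List.pyGetD plants left 0
      let a1 := if a < pl then capacityA else a
      let r1 := if a < pl then refills + 1 else refills
      let a2 := a1 - pl
      let pr := PySem.List.pyGetD plants right 0
      let b1 := if b < pr then capacityB else b
      let r2 := if b < pr then r1 + 1 else r1
      let b2 := b1 - pr
      minimumRefillLoop plants capacityA capacityB fuel (left + 1) (right - 1) a2 b2 r2
    else (left, right, a, b, refills)

def minimumRefill (plants : List Int) (capacityA : Int) (capacityB : Int) : Int :=
  let n : Int := plants.length
  let st := minimumRefillLoop plants capacityA capacityB plants.length 0 (n - 1) capacityA capacityB 0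
  let left := st.1
  let right := st.2.1
  let a := st.2.2.1
  let b := st.2.2.2.1
  let refills := st.2.2.2.2
  if left = right then
    if max a b < PySem.List.pyGetD plants left 0 then refills + 1 else refills
  else refills

-- ===== PORT B =====
-- Source B's inner while-loop: drains the current tank `water` across a maximal run of plants,
-- returning the leftover water and the not-yet-watered suffix (stops at the first plant
-- that exceeds the water, i.e. Python's `while i < m and water >= seg[i]`).
def drainInner (water : Int) : List Int → Int × List Int
  | [] => (water, [])
  | p :: rest => if water < p then (water, p :: rest) else drainInner (water - p) rest

-- Source B's outer while-loop: one iteration per tankful; after the inner drain, refill and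
-- water the blocking plant (`cnt += 1; water = cap - seg[i]; i += 1`). fuel = seg.length
-- bounds the number of outer iterations (each consumes at least one plant).
def drainOuter (cap : Int) : Nat → List Int → Int → Int → Int × Int
  | 0, _, water, cnt => (water, cnt)
  | fuel + 1, seg, water, cnt =>
    match drainInner water seg with
    | (w, []) => (w, cnt)
    | (w, p :: rest) =>
      let _ := w
      drainOuter cap fuel rest (cap - p) (cnt + 1)

def drain (cap : Int) (seg : List Int) : Int × Int :=
  drainOuter cap seg.length seg cap 0

def minimumRefill_alt (plants : List Int) (capacityA : Int) (capacityB : Int) : Int :=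
  let n := plants.length
  let half := n / 2
  let s1 := drain capacityA (plants.take half)
  let s2 := drain capacityB ((plants.drop (half + n % 2)).reverse)
  let refills := s1.2 + s2.2
  if n % 2 = 1 ∧ max s1.1 s2.1 < plants.getD half 0 then refills + 1 else refills

-- ===== PRECONDITION & SPEC =====
def Spec_minimumRefill (plants : List Int) (capacityA : Int) (capacityB : Int) (out : Int) : Prop := out = minimumRefill_alt plants capacityA capacityB
instance (plants : List Int) (capacityA : Int) (capacityB : Int) (out : Int) : Decidable (Spec_minimumRefill plants capacityA capacityB out) := by unfold Spec_minimumRefill; infer_instance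

-- ===== CLAIM (what is proved, stated in full; the proofs are below) =====
def Claim_equal_minimumRefill : Prop := ∀ (plants : List Int) (capacityA : Int) (capacityB : Int), Dom_minimumRefill plants capacityA capacityB → Spec_minimumRefill plants capacityA capacityB (minimumRefill plants capacityA capacityB)

-- ===== LEMMAS AND PROOFS =====

-- proof-only intermediate: one watering step of a single gardener with full capacity `cap`
def waterStep (cap : Int) (st : Int × Int) (p : Int) : Int × Int :=
  if st.1 < p then (cap - p, st.2 + 1) else (st.1 - p, st.2)

-- the refill counter threads additively through a gardener's fold
theorem foldl_water_add (cap : Int) (ps : List Int) (a r : Int) :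
    ps.foldl (waterStep cap) (a, r) =
      ((ps.foldl (waterStep cap) (a, 0)).1, r + (ps.foldl (waterStep cap) (a, 0)).2) := by
  induction ps generalizing a r with
  | nil => simp
  | cons p ps ih =>
    simp only [List.foldl_cons, waterStep]
    split_ifs with h
    · rw [ih (cap - p) (r + 1), ih (cap - p) (0 + 1)]
      exact Prod.ext rfl (by omega)
    · exact ih (a - p) r

-- peeling one element off a gardener's fold
theorem foldl_water_cons (cap p : Int) (l : List Int) (a : Int) :
    (p :: l).foldl (waterStep cap) (a, 0)
      = ((l.foldl (waterStep cap) ((if a < p then cap else a) - p, 0)).1,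
         (if a < p then (1 : Int) else 0)
           + (l.foldl (waterStep cap) ((if a < p then cap else a) - p, 0)).2) := by
  simp only [List.foldl_cons, waterStep]
  split_ifs with h
  · rw [foldl_water_add cap l (cap - p) (0 + 1)]
    exact Prod.ext rfl (by omega)
  · rw [foldl_water_add cap l (a - p) 0]
    exact Prod.ext rfl (by omega)

-- B's inner drain versus the fold: the consumed prefix causes no refill, the suffix is
-- blocked (its head exceeds the leftover water), and it is no longer than the input
theorem drainInner_spec (cap : Int) : ∀ (seg : List Int) (water cnt : Int),
    seg.foldl (waterStep cap) (water, cnt)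
      = (drainInner water seg).2.foldl (waterStep cap) ((drainInner water seg).1, cnt)
    ∧ (drainInner water seg).2.length ≤ seg.length
    ∧ (∀ p rest, (drainInner water seg).2 = p :: rest → (drainInner water seg).1 < p) := by
  intro seg
  induction seg with
  | nil => intro water cnt; exact ⟨rfl, le_refl _, by intro p rest h; cases h⟩
  | cons p rest ih =>
    intro water cnt
    simp only [drainInner]
    split_ifs with h
    · exact ⟨rfl, le_refl _, by intro q r hq; cases hq; exact h⟩
    · obtain ⟨ih1, ih2, ih3⟩ := ih (water - p) cnt
      refine ⟨?_, by simpa using Nat.le_succ_of_le ih2, ih3⟩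
      simp only [List.foldl_cons, waterStep]
      rw [if_neg h]
      exact ih1

-- B's outer loop equals the one-step fold, given enough fuel
theorem drainOuter_eq_fold (cap : Int) : ∀ (fuel : Nat) (seg : List Int) (water cnt : Int),
    seg.length ≤ fuel →
    drainOuter cap fuel seg water cnt = seg.foldl (waterStep cap) (water, cnt) := by
  intro fuel
  induction fuel with
  | zero =>
    intro seg water cnt hle
    have : seg = [] := List.eq_nil_of_length_eq_zero (Nat.le_zero.mp hle)
    subst this; rfl
  | succ f ih =>
    intro seg water cnt hle
    obtain ⟨h1, h2, h3⟩ := drainInner_spec cap seg water cnt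
    simp only [drainOuter]
    rcases hd : drainInner water seg with ⟨w, out⟩
    cases out with
    | nil => rw [h1, hd]; rfl
    | cons p rest =>
      have hwp : w < p := by have := h3 p rest; rw [hd] at this; exact this rfl
      have hlen : rest.length ≤ f := by
        have := h2; rw [hd] at this; simp at this; omega
      rw [h1, hd]
      simp only [List.foldl_cons, waterStep]
      rw [if_pos hwp]
      exact ih rest (cap - p) (cnt + 1) hlen

-- hence B's drain is the fold starting from a full tank and zero refills
theorem drain_eq_fold (cap : Int) (seg : List Int) :
    drain cap seg = seg.foldl (waterStep cap) (cap, 0) :=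
  drainOuter_eq_fold cap seg.length seg cap 0 (le_refl _)

-- A's loop = two independent folds: the left pointer consumes the first k elements,
-- the right pointer the last k in reverse order, and the refill counts add.
theorem loop_eq (plants : List Int) (capA capB : Int) :
    ∀ (k fuel : Nat) (left right a b r : Int),
      k ≤ fuel → 0 ≤ left → right < (plants.length : Int) →
      (right - left = 2 * (k : Int) - 1 ∨ right - left = 2 * (k : Int)) →
      minimumRefillLoop plants capA capB fuel left right a b r =
        (left + k, right - k,
         (((plants.drop left.toNat).take k).foldl (waterStep capA) (a, 0)).1,
         ((((plants.drop (right.toNat + 1 - k)).take k).reverse).foldl (waterStep capB) (b, 0)).1,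
         r + (((plants.drop left.toNat).take k).foldl (waterStep capA) (a, 0)).2
           + ((((plants.drop (right.toNat + 1 - k)).take k).reverse).foldl (waterStep capB) (b, 0)).2) := by
  intro k
  induction k with
  | zero =>
    intro fuel left right a b r _ hl hr hgap
    cases fuel with
    | zero =>
      simp only [minimumRefillLoop, List.take_zero, List.reverse_nil, List.foldl_nil,
        Nat.cast_zero, add_zero, sub_zero]
    | succ f =>
      simp only [minimumRefillLoop]
      rw [if_neg (by omega : ¬ left < right)]
      simp only [List.take_zero, List.reverse_nil, List.foldl_nil, Nat.cast_zero, add_zero,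
        sub_zero]
  | succ k ih =>
    intro fuel left right a b r hkf hl hr hgap
    obtain ⟨f, rfl⟩ : ∃ f, fuel = f + 1 := ⟨fuel - 1, by omega⟩
    have hlr : left < right := by omega
    have hlen : left.toNat < plants.length := by omega
    have hrlen : right.toNat < plants.length := by omega
    simp only [minimumRefillLoop]
    rw [if_pos hlr]
    have hfr : (plants.drop left.toNat).take (k + 1)
        = plants[left.toNat] :: (plants.drop (left + 1).toNat).take k := by
      have h1 : (left + 1).toNat = left.toNat + 1 := by omega
      rw [h1, ← List.getElem_cons_drop hlen, List.take_succ_cons]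
    have hbk : ((plants.drop (right.toNat + 1 - (k + 1))).take (k + 1)).reverse
        = plants[right.toNat] :: ((plants.drop ((right - 1).toNat + 1 - k)).take k).reverse := by
      have hidx : (plants.drop (right.toNat - k))[k]? = some plants[right.toNat] := by
        rw [List.getElem?_drop]
        have hke : right.toNat - k + k = right.toNat := by omega
        rw [hke, List.getElem?_eq_getElem hrlen]
      have h1 : right.toNat + 1 - (k + 1) = right.toNat - k := by omega
      have h2 : (right - 1).toNat + 1 - k = right.toNat - k := by omega
      rw [h1, h2, List.take_add_one, hidx]
      simp
    have hpl : PySem.List.pyGetD plants left 0 = plants[left.toNat] :=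
      PySem.List.pyGetD_eq_getElem plants 0 hl (by omega)
    have hpr : PySem.List.pyGetD plants right 0 = plants[right.toNat] :=
      PySem.List.pyGetD_eq_getElem plants 0 (by omega) hr
    rw [hpl, hpr, hfr, hbk]
    have ihx := ih f (left + 1) (right - 1)
      ((if a < plants[left.toNat] then capA else a) - plants[left.toNat])
      ((if b < plants[right.toNat] then capB else b) - plants[right.toNat])
      (if b < plants[right.toNat]
        then (if a < plants[left.toNat] then r + 1 else r) + 1
        else (if a < plants[left.toNat] then r + 1 else r))
      (by omega) (by omega) (by omega) (by omega)
    rw [ihx, foldl_water_cons, foldl_water_cons]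
    simp only [Prod.mk.injEq]
    refine ⟨by push_cast; ring, by push_cast; ring, trivial, trivial, ?_⟩
    split_ifs <;> omega

-- ===== VERDICT (by name: the statement is the Claim_ definition above) =====
theorem minimumRefill_spec : Claim_equal_minimumRefill := by
  intro plants capA capB _
  unfold Spec_minimumRefill
  simp only [minimumRefill, minimumRefill_alt, drain_eq_fold]
  rcases Nat.eq_zero_or_pos plants.length with h0 | hpos
  · have hnil : plants = [] := List.eq_nil_of_length_eq_zero h0
    subst hnil
    norm_num [minimumRefillLoop]
  · have hgap : ((plants.length : Int) - 1) - 0 = 2 * ((plants.length / 2 : Nat) : Int) - 1 ∨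
        ((plants.length : Int) - 1) - 0 = 2 * ((plants.length / 2 : Nat) : Int) := by omega
    rw [loop_eq plants capA capB (plants.length / 2) plants.length 0 ((plants.length : Int) - 1)
        capA capB 0 (by omega) le_rfl (by omega) hgap]
    have hidx : ((plants.length : Int) - 1).toNat + 1 - plants.length / 2
        = plants.length / 2 + plants.length % 2 := by omega
    have htk : (plants.drop (plants.length / 2 + plants.length % 2)).take (plants.length / 2)
        = plants.drop (plants.length / 2 + plants.length % 2) := by
      apply List.take_of_length_le
      simp only [List.length_drop]
      omega
    simp only [Int.toNat_zero, List.drop_zero, hidx, htk, zero_add,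
      PySem.List.pyGetD_natCast]
    by_cases hodd : plants.length % 2 = 1
    · rw [if_pos (by omega :
        ((plants.length / 2 : Nat) : Int) = (plants.length : Int) - 1 - (plants.length / 2 : Nat))]
      simp only [hodd, true_and]
    · rw [if_neg (by omega :
        ¬ ((plants.length / 2 : Nat) : Int) = (plants.length : Int) - 1 - (plants.length / 2 : Nat))]
      simp only [hodd, false_and, if_false]
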